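-- pv_equiv track=rewrite | github.com/YufanSongVertin/sql-explanation-system | SQLExplain/src/search.py | _split_clause
-- ===== SOURCE A (Python) =====
-- from typing import List, Optional
--
-- def _split_clause(query: str, start_kw: str, next_kws: List[str]) -> Optional[str]:
--     """
--     Extract the content of a clause starting at `start_kw` up to the next keyword
--     in `next_kws` (or the end of the query if none is found).
--
--     Example:
--         _split_clause(sql, "where", ["group by", "order by", "limit"])
--     """
--     q_lower = query.lower()
--     start_idx = q_lower.find(start_kw)
--     if start_idx == -1:
--         return None
--
--     content_start = start_idx + len(start_kw)
--
--     next_positions: List[int] = []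
--     for kw in next_kws:
--         pos = q_lower.find(kw, content_start)
--         if pos != -1:
--             next_positions.append(pos)
--
--     if next_positions:
--         end_idx = min(next_positions)
--         content = query[content_start:end_idx]
--     else:
--         content = query[content_start:]
--
--     return content.strip() or None
-- ===== SOURCE B (Python) =====
-- from typing import List, Optional
--
-- def _split_clause(query: str, start_kw: str, next_kws: List[str]) -> Optional[str]:
--     """Scan forward once from the end of start_kw and stop at the first position
--     where any of next_kws begins, instead of running one find() per keyword and
--     taking the minimum."""
--     q_lower = query.lower()
--     start_idx = q_lower.find(start_kw)
--     if start_idx == -1: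
--         return None
--
--     content_start = start_idx + len(start_kw)
--
--     end_idx = len(query)
--     for i in range(content_start, len(query)):
--         if any(q_lower.startswith(kw, i) for kw in next_kws):
--             end_idx = i
--             break
--
--     content = query[content_start:end_idx].strip()
--     return content or None
-- ===== Notes on version B (the rewrite author's own statement) =====
-- stated objective: alternative
-- what changed: Instead of running one find() per next-keyword, collecting the hit positions in a list and taking min(), B scans forward once from the end of start_kw and stops at the first position where any next-keyword begins (leftmost-match scan, no position list).
import Mathlib
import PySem

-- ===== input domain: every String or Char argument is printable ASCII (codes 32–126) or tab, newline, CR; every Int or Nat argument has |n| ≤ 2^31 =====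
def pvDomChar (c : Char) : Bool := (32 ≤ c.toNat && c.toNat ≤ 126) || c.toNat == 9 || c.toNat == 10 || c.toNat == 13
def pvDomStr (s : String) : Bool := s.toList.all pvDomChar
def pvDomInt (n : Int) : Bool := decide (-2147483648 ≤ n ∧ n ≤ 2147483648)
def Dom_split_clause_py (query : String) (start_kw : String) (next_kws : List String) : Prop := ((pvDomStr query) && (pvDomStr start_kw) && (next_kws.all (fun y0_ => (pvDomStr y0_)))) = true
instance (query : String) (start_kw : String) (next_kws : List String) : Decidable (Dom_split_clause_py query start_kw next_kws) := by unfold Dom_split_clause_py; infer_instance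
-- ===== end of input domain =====

-- B replaces A's per-keyword find()+min() with a single forward scan stopping at the
-- first position where any next-keyword begins (alternative algorithm, same cost class).

-- ===== PORT A =====
-- the 'for kw in next_kws: pos = q_lower.find(kw, content_start); if pos != -1: next_positions.append(pos)' loop
def pvPositionsA (qLower : List Char) (next_kws : List String) (contentStart : Int) : List Int :=
  next_kws.foldl (fun acc kw =>
    let pos := PySem.Chars.findFrom qLower kw.toList contentStart
    if pos ≠ -1 then acc ++ [pos] else acc) []

def split_clause_py (query : String) (start_kw : String) (next_kws : List String) : Option String :=
  let q := query.toList
  let qLower := PySem.Chars.lower q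
  let startIdx := PySem.Chars.find qLower start_kw.toList
  if startIdx = -1 then none
  else
    let contentStart : Int := startIdx + start_kw.toList.length
    let nextPositions := pvPositionsA qLower next_kws contentStart
    -- 'if next_positions: content = query[content_start:min(next_positions)] else: query[content_start:]'
    let content :=
      match PySem.List.min? nextPositions (fun x => x) with
      | some endIdx => PySem.Chars.slice q (some contentStart) (some endIdx)
      | none => PySem.Chars.slice q (some contentStart) none
    -- 'return content.strip() or None'
    let stripped := PySem.Chars.strip content
    if stripped = [] then none else some (String.ofList stripped)

-- ===== PORT B =====
-- 'any(q_lower.startswith(kw, i) for kw in next_kws)'; s.startswith(p, i) for 0 ≤ i ≤ len(s)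
-- is exactly: p is a prefix of s[i:]
def pvAnyKw (qLower : List Char) (next_kws : List String) (i : Nat) : Bool :=
  next_kws.any (fun kw => PySem.Chars.startswith (qLower.drop i) kw.toList)

-- 'for i in range(content_start, len(query)): if any(...): end_idx = i; break' (else end_idx = len)
def pvScan (qLower : List Char) (next_kws : List String) (i len : Nat) : Nat :=
  if _h : i < len then
    if pvAnyKw qLower next_kws i then i else pvScan qLower next_kws (i + 1) len
  else len
termination_by len - i

def split_clause_py_alt (query : String) (start_kw : String) (next_kws : List String) : Option String :=
  let q := query.toList
  let qLower := PySem.Chars.lower q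
  let startIdx := PySem.Chars.find qLower start_kw.toList
  if startIdx = -1 then none
  else
    let contentStart : Int := startIdx + start_kw.toList.length
    -- contentStart ≥ 0 here (find succeeded), so .toNat is exact
    let endIdx := pvScan qLower next_kws contentStart.toNat q.length
    let content := PySem.Chars.strip (PySem.Chars.slice q (some contentStart) (some (endIdx : Int)))
    if content = [] then none else some (String.ofList content)

-- ===== PRECONDITION & SPEC =====
def Spec_split_clause_py (query : String) (start_kw : String) (next_kws : List String) (out : Option String) : Prop := out = split_clause_py_alt query start_kw next_kws
instance (query : String) (start_kw : String) (next_kws : List String) (out : Option String) : Decidable (Spec_split_clause_py query start_kw next_kws out) := by unfold Spec_split_clause_py; infer_instance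

-- ===== CLAIM (what is proved, stated in full; the proofs are below) =====
def Claim_equal_split_clause_py : Prop := ∀ (query : String) (start_kw : String) (next_kws : List String), Dom_split_clause_py query start_kw next_kws → Spec_split_clause_py query start_kw next_kws (split_clause_py query start_kw next_kws)

-- ===== LEMMAS AND PROOFS =====

lemma pvAnyKw_eq_true_iff (ql : List Char) (kws : List String) (j : Nat) :
    pvAnyKw ql kws j = true ↔ ∃ kw ∈ kws, kw.toList <+: ql.drop j := by
  simp [pvAnyKw, PySem.Chars.startswith_iff]

lemma pvInfix_drop_iff (s sub : List Char) (k : Nat) :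
    sub <:+: s.drop k ↔ ∃ j, k ≤ j ∧ sub <+: s.drop j := by
  constructor
  · intro h
    obtain ⟨j, hj⟩ := (PySem.Chars.exists_prefix_drop_iff_isIn sub (s.drop k)).mpr
      ((PySem.Chars.isIn_iff_infix sub (s.drop k)).mpr h)
    exact ⟨k + j, by omega, by simpa [List.drop_drop] using hj⟩
  · rintro ⟨j, hkj, hj⟩
    refine (PySem.Chars.isIn_iff_infix sub (s.drop k)).mp
      ((PySem.Chars.exists_prefix_drop_iff_isIn sub (s.drop k)).mp ⟨j - k, ?_⟩)
    rwa [List.drop_drop, Nat.add_sub_cancel' hkj]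

lemma pvScan_eq_of (ql : List Char) (kws : List String) (len t : Nat)
    (hm : t < len → pvAnyKw ql kws t = true) :
    ∀ i, i ≤ t → t ≤ len → (∀ j, i ≤ j → j < t → pvAnyKw ql kws j = false) →
    pvScan ql kws i len = t := by
  suffices H : ∀ n i, t - i ≤ n → i ≤ t → t ≤ len →
      (∀ j, i ≤ j → j < t → pvAnyKw ql kws j = false) → pvScan ql kws i len = t by
    intro i h1 h2 h3; exact H (t - i) i le_rfl h1 h2 h3
  intro n
  induction n with
  | zero =>
    intro i h0 hit htl _
    have hi : i = t := by omega
    subst hi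
    rw [pvScan]
    by_cases h : i < len
    · simp [h, hm h]
    · simp [h]; omega
  | succ n ih =>
    intro i h0 hit htl hno
    rcases Nat.eq_or_lt_of_le hit with rfl | hlt
    · rw [pvScan]
      by_cases h : i < len
      · simp [h, hm h]
      · simp [h]; omega
    · have hi : i < len := lt_of_lt_of_le hlt htl
      rw [pvScan]
      simp only [hi, dif_pos, hno i le_rfl hlt, Bool.false_eq_true, if_false]
      exact ih (i + 1) (by omega) hlt htl (fun j hj hjt => hno j (by omega) hjt)

lemma pvPositionsA_eq (ql : List Char) (kws : List String) (cs : Int) :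
    pvPositionsA ql kws cs =
      (kws.filter (fun kw => decide (PySem.Chars.findFrom ql kw.toList cs ≠ -1))).map
        (fun kw => PySem.Chars.findFrom ql kw.toList cs) := by
  unfold pvPositionsA
  simpa using PySem.List.foldl_append_if
    (l := kws) (p := fun kw => decide (PySem.Chars.findFrom ql kw.toList cs ≠ -1))
    (f := fun kw => PySem.Chars.findFrom ql kw.toList cs) (acc := [])

lemma pvContents_eq (q : List Char) (kws : List String) (cs : Nat)
    (hcs : cs ≤ q.length) :
    (match PySem.List.min? (pvPositionsA (PySem.Chars.lower q) kws (cs : Int)) (fun x => x) with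
      | some endIdx => PySem.Chars.slice q (some (cs : Int)) (some endIdx)
      | none => PySem.Chars.slice q (some (cs : Int)) none)
    = PySem.Chars.slice q (some (cs : Int))
        (some ((pvScan (PySem.Chars.lower q) kws cs q.length : Nat) : Int)) := by
  have hlen : (PySem.Chars.lower q).length = q.length := by simp [PySem.Chars.lower]
  have hcs' : cs ≤ (PySem.Chars.lower q).length := by omega
  rw [pvPositionsA_eq]
  cases h : PySem.List.min?
      ((kws.filter (fun kw => decide (PySem.Chars.findFrom (PySem.Chars.lower q) kw.toList (cs : Int) ≠ -1))).map
        (fun kw => PySem.Chars.findFrom (PySem.Chars.lower q) kw.toList (cs : Int)))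
      (fun x => x) with
  | none =>
    -- no keyword occurs at or after cs
    have hempty := (PySem.List.min?_eq_none_iff _ _).mp h
    rw [List.map_eq_nil_iff, List.filter_eq_nil_iff] at hempty
    have hnone : ∀ kw ∈ kws, ∀ j, cs ≤ j → ¬ kw.toList <+: (PySem.Chars.lower q).drop j := by
      intro kw hkw j hj hp
      have hne := hempty kw hkw
      simp only [decide_not, Bool.not_eq_true', decide_eq_false_iff_not, not_not] at hne
      rw [PySem.Chars.findFrom_natCast_eq_neg_one_iff _ _ cs hcs'] at hne
      exact hne ((pvInfix_drop_iff _ _ cs).mpr ⟨j, hj, hp⟩)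
    have hscan : pvScan (PySem.Chars.lower q) kws cs q.length = q.length := by
      refine pvScan_eq_of _ _ _ _ (fun hlt => absurd hlt (lt_irrefl _)) cs hcs (le_refl _) ?_
      intro j hj hjlen
      cases hb : pvAnyKw (PySem.Chars.lower q) kws j with
      | false => rfl
      | true =>
        obtain ⟨kw, hkw, hp⟩ := (pvAnyKw_eq_true_iff _ _ _).mp hb
        exact absurd hp (hnone kw hkw j hj)
    rw [hscan]
    rw [PySem.Chars.slice_eq_listSlice, PySem.Chars.slice_eq_listSlice,
      PySem.List.slice_from q (by omega : (0:Int) ≤ (cs : Int)),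
      PySem.List.slice_toNat q (by omega) (by omega)]
    rw [List.take_of_length_le (by rw [List.length_drop]; omega)]
  | some m =>
    have hmem := PySem.List.min?_mem h
    have hmin := PySem.List.min?_isMin h
    simp only [List.mem_map, List.mem_filter, decide_eq_true_eq] at hmem
    obtain ⟨kw₀, ⟨hkw₀, hne₀⟩, hf₀⟩ := hmem
    have hspec₀ := PySem.Chars.findFrom_natCast_spec (PySem.Chars.lower q) kw₀.toList cs hcs' hne₀
    rw [hf₀] at hspec₀
    obtain ⟨hcm, hpre₀, -⟩ := hspec₀
    have hm0 : 0 ≤ m := le_trans (by omega) hcm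
    have hmlen : m ≤ ((PySem.Chars.lower q).length : Int) := by
      have hrw := PySem.Chars.findFrom_natCast (PySem.Chars.lower q) kw₀.toList cs hcs'
      rw [hf₀] at hrw
      by_cases hcon : PySem.Chars.find ((PySem.Chars.lower q).drop cs) kw₀.toList = -1
      · rw [if_pos hcon] at hrw
        exact absurd (hf₀.trans hrw) hne₀
      · rw [if_neg hcon] at hrw
        have hfl := PySem.Chars.find_le_length ((PySem.Chars.lower q).drop cs) kw₀.toList
        rw [List.length_drop] at hfl
        omega
    have hmt : m = ((m.toNat : Nat) : Int) := (Int.toNat_of_nonneg hm0).symm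
    have hscan : pvScan (PySem.Chars.lower q) kws cs q.length = m.toNat := by
      refine pvScan_eq_of _ _ _ _ (fun _ => ?_) cs (by omega) (by omega) ?_
      · exact (pvAnyKw_eq_true_iff _ _ _).mpr ⟨kw₀, hkw₀, hpre₀⟩
      · intro j hj hjt
        cases hb : pvAnyKw (PySem.Chars.lower q) kws j with
        | false => rfl
        | true =>
          exfalso
          obtain ⟨kw', hkw', hp'⟩ := (pvAnyKw_eq_true_iff _ _ _).mp hb
          have hne' : PySem.Chars.findFrom (PySem.Chars.lower q) kw'.toList (cs : Int) ≠ -1 := by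
            rw [ne_eq, PySem.Chars.findFrom_natCast_eq_neg_one_iff _ _ cs hcs', not_not]
            exact (pvInfix_drop_iff _ _ cs).mpr ⟨j, hj, hp'⟩
          have hmemP : PySem.Chars.findFrom (PySem.Chars.lower q) kw'.toList (cs : Int) ∈
              (kws.filter (fun kw => decide (PySem.Chars.findFrom (PySem.Chars.lower q) kw.toList (cs : Int) ≠ -1))).map
                (fun kw => PySem.Chars.findFrom (PySem.Chars.lower q) kw.toList (cs : Int)) := by
            simp only [List.mem_map, List.mem_filter, decide_eq_true_eq]
            exact ⟨kw', ⟨hkw', hne'⟩, rfl⟩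
          have hle := hmin _ hmemP
          have hspec' := PySem.Chars.findFrom_natCast_spec (PySem.Chars.lower q) kw'.toList cs hcs' hne'
          obtain ⟨hcm', -, hmin'⟩ := hspec'
          have hjge : (PySem.Chars.findFrom (PySem.Chars.lower q) kw'.toList (cs : Int)).toNat ≤ j := by
            by_contra hcon
            exact hmin' j hj (by omega) hp'
          simp only at hle
          omega
    rw [hscan, ← hmt]

-- ===== VERDICT (by name: the statement is the Claim_ definition above) =====
theorem split_clause_py_spec : Claim_equal_split_clause_py := by
  intro query start_kw next_kws _
  unfold Spec_split_clause_py split_clause_py split_clause_py_alt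
  by_cases h0 : PySem.Chars.find (PySem.Chars.lower query.toList) start_kw.toList = -1
  · simp [h0]
  · have hm1 := PySem.Chars.neg_one_le_find (PySem.Chars.lower query.toList) start_kw.toList
    have hnn : 0 ≤ PySem.Chars.find (PySem.Chars.lower query.toList) start_kw.toList := by
      omega
    set si := PySem.Chars.find (PySem.Chars.lower query.toList) start_kw.toList with hsi
    have hlen : (PySem.Chars.lower query.toList).length = query.toList.length := by
      simp [PySem.Chars.lower]
    have hspec := PySem.Chars.findFrom_natCast_spec (PySem.Chars.lower query.toList)
      start_kw.toList 0 (by omega) (by simpa [PySem.Chars.findFrom_zero, ← hsi] using h0)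
    simp only [Nat.cast_zero, PySem.Chars.findFrom_zero, ← hsi] at hspec
    have hpre := hspec.2.1
    have hup : si.toNat + start_kw.toList.length ≤ query.toList.length := by
      have hle := PySem.Chars.find_le_length (PySem.Chars.lower query.toList) start_kw.toList
      rw [← hsi, hlen] at hle
      have h1 := hpre.length_le
      rw [List.length_drop, hlen] at h1
      omega
    have hc0 : 0 ≤ si + (start_kw.toList.length : Int) := by omega
    have hcc : si + (start_kw.toList.length : Int) =
        (((si + (start_kw.toList.length : Int)).toNat : Nat) : Int) :=
      (Int.toNat_of_nonneg hc0).symm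
    have key := pvContents_eq query.toList next_kws
      ((si + (start_kw.toList.length : Int)).toNat) (by omega)
    rw [Int.toNat_of_nonneg hc0] at key
    simp only [← hsi, if_neg h0]
    rw [key]
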